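-- pv_equiv track=rewrite | github.com/martimunicoy/IrrigationServer | server/scheduleManager/graphs.py | get_weekday_to_print
-- ===== SOURCE A (Python) =====
-- WEEKDAYS_DICT = {0: 'Monday', 1: 'Tuesday', 2: 'Wednesday', 3: 'Thursday',
--                  4: 'Friday', 5: 'Saturday', 6: 'Sunday'}
--
-- def get_weekday_to_print(weekday, iterations):
--     weekday_index = weekday
--
--     if (iterations > 0):
--         for i in range(0, iterations):
--             if (weekday_index < 6):
--                 weekday_index += 1
--             else:
--                 weekday_index = 0
--     else:
--         iterations = -iterations
--         for i in range(0, iterations):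
--             if (weekday_index > 0):
--                 weekday_index -= 1
--             else:
--                 weekday_index = 6
--
--     return WEEKDAYS_DICT[weekday_index]
-- ===== SOURCE B (Python) =====
-- WEEKDAYS = ['Monday', 'Tuesday', 'Wednesday', 'Thursday',
--             'Friday', 'Saturday', 'Sunday']
--
--
-- def get_weekday_to_print(weekday, iterations):
--     return WEEKDAYS[(weekday + iterations) % 7]
-- ===== Notes on version B (the rewrite author's own statement) =====
-- stated objective: simpler
-- what changed: Replaces the step-by-step wrap-around loop over |iterations| with a single modular-arithmetic index (weekday + iterations) % 7 into a weekday list; Pre_ restricts weekday to the natural domain 0..6, outside which A either raises KeyError or returns an artefact of its clamp-style looping.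
-- outside the precondition, e.g. on get_weekday_to_print(10, 3): A returns 'Wednesday', B returns 'Sunday'; on get_weekday_to_print(8, 0): A raises KeyError, B returns 'Tuesday'
import Mathlib
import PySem

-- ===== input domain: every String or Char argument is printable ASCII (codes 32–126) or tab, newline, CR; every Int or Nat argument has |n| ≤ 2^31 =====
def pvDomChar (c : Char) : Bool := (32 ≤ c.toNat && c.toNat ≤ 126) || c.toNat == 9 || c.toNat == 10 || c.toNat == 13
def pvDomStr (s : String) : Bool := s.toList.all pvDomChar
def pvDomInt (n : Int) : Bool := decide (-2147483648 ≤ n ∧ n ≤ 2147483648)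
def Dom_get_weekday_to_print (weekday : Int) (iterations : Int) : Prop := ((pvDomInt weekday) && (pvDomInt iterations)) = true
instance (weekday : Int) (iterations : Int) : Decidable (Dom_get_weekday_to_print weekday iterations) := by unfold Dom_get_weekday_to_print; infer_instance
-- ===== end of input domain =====

-- B replaces A's step-by-step wrap-around loop with one modular index, (weekday + iterations) % 7 (objective: simpler).

-- ===== PORT A =====
def WEEKDAYS_DICT : PySem.Dict Int String :=
  PySem.Dict.ofList [(0, "Monday"), (1, "Tuesday"), (2, "Wednesday"), (3, "Thursday"),
                     (4, "Friday"), (5, "Saturday"), (6, "Sunday")]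

def get_weekday_to_print (weekday : Int) (iterations : Int) : String :=
  let weekday_index := weekday
  let weekday_index :=
    if iterations > 0 then
      (PySem.List.pyRange 0 iterations 1).foldl
        (fun x _ => if x < 6 then x + 1 else 0) weekday_index
    else
      let iterations := -iterations
      (PySem.List.pyRange 0 iterations 1).foldl
        (fun x _ => if x > 0 then x - 1 else 6) weekday_index
  -- WEEKDAYS_DICT[weekday_index]; none = KeyError, excluded by Pre_
  (WEEKDAYS_DICT.get? weekday_index).getD ""

-- ===== PORT B =====
def WEEKDAYS : List String :=
  ["Monday", "Tuesday", "Wednesday", "Thursday", "Friday", "Saturday", "Sunday"]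

def get_weekday_to_print_alt (weekday : Int) (iterations : Int) : String :=
  (PySem.List.pyGet? WEEKDAYS (PySem.Int.mod (weekday + iterations) 7)).getD ""

-- ===== PRECONDITION & SPEC =====
-- Pre_ restricts weekday to the function's natural domain 0..6 (the keys of WEEKDAYS_DICT):
-- outside it A either raises KeyError or returns a value that is an artefact of its
-- clamp-to-0/6 stepping loop, not a weekday shifted by `iterations`.
def Pre_get_weekday_to_print (weekday : Int) (iterations : Int) : Prop :=
  0 ≤ weekday ∧ weekday ≤ 6
instance (weekday : Int) (iterations : Int) : Decidable (Pre_get_weekday_to_print weekday iterations) := by unfold Pre_get_weekday_to_print; infer_instance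

def pvWitness_get_weekday_to_print : Int × Int := (3, 5)

def Spec_get_weekday_to_print (weekday : Int) (iterations : Int) (out : String) : Prop := out = get_weekday_to_print_alt weekday iterations
instance (weekday : Int) (iterations : Int) (out : String) : Decidable (Spec_get_weekday_to_print weekday iterations out) := by unfold Spec_get_weekday_to_print; infer_instance

-- ===== CLAIM (what is proved, stated in full; the proofs are below) =====
def Claim_equal_get_weekday_to_print : Prop := ∀ (weekday : Int) (iterations : Int), Dom_get_weekday_to_print weekday iterations → Pre_get_weekday_to_print weekday iterations → Spec_get_weekday_to_print weekday iterations (get_weekday_to_print weekday iterations)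

-- ===== LEMMAS AND PROOFS =====

-- A's forward loop body, folded over any list, is addition of the length mod 7.
theorem fold_fwd (l : List Int) (x : Int) (h0 : 0 ≤ x) (h6 : x ≤ 6) :
    l.foldl (fun x _ => if x < 6 then x + 1 else 0) x = (x + l.length) % 7 := by
  induction l generalizing x with
  | nil => simp; omega
  | cons a t ih =>
    simp only [List.foldl_cons, List.length_cons]
    by_cases h : x < 6
    · rw [if_pos h, ih (x + 1) (by omega) (by omega)]; omega
    · rw [if_neg h, ih 0 (by omega) (by omega)]; omega

-- A's backward loop body, folded over any list, is subtraction of the length mod 7.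
theorem fold_bwd (l : List Int) (x : Int) (h0 : 0 ≤ x) (h6 : x ≤ 6) :
    l.foldl (fun x _ => if x > 0 then x - 1 else 6) x = (x - l.length) % 7 := by
  induction l generalizing x with
  | nil => simp; omega
  | cons a t ih =>
    simp only [List.foldl_cons, List.length_cons]
    by_cases h : x > 0
    · rw [if_pos h, ih (x - 1) (by omega) (by omega)]; omega
    · rw [if_neg h, ih 6 (by omega) (by omega)]; omega

-- Looking up r ∈ [0,7) in A's dict equals indexing B's list at r.
theorem lookup_eq (r : Int) (h0 : 0 ≤ r) (h7 : r < 7) :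
    (WEEKDAYS_DICT.get? r).getD "" = (PySem.List.pyGet? WEEKDAYS r).getD "" := by
  interval_cases r <;> decide

-- ===== VERDICT (by name: the statement is the Claim_ definition above) =====
theorem get_weekday_to_print_spec : Claim_equal_get_weekday_to_print := by
  intro w it _ hpre
  obtain ⟨h0, h6⟩ := hpre
  show get_weekday_to_print w it = get_weekday_to_print_alt w it
  unfold get_weekday_to_print get_weekday_to_print_alt
  rw [PySem.Int.mod_eq_emod_of_pos (by norm_num)]
  dsimp only
  by_cases hit : it > 0
  · rw [if_pos hit, fold_fwd _ _ h0 h6, PySem.List.length_pyRange_one]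
    have hl : ((it - 0).toNat : Int) = it := by omega
    rw [hl, lookup_eq _ (Int.emod_nonneg _ (by norm_num)) (by omega)]
  · rw [if_neg hit, fold_bwd _ _ h0 h6, PySem.List.length_pyRange_one]
    have hl : ((-it - 0).toNat : Int) = -it := by omega
    rw [hl]
    have : (w - -it) % 7 = (w + it) % 7 := by ring_nf
    rw [this, lookup_eq _ (Int.emod_nonneg _ (by norm_num)) (by omega)]
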